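-- pv_equiv track=rewrite | github.com/jaksaj/rinbp25-promptVs | graph/generate_graph_prompts.py | bfs_at_depth
-- ===== SOURCE A (Python) =====
-- from collections import deque, defaultdict
-- from typing import List, Tuple, Dict, Set
--
-- def bfs_at_depth(graph: Dict[str, List[str]], start: str, depth: int) -> List[str]:
--     """Perform BFS and return nodes at specific depth."""
--     if depth == 0:
--         return []
--
--     visited = set()
--     queue = deque([(start, 0)])
--     visited.add(start)
--     nodes_at_depth = []
--
--     while queue:
--         node, current_depth = queue.popleft()
--
--         if current_depth == depth:
--             nodes_at_depth.append(node)
--         elif current_depth < depth: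
--             for neighbor in graph.get(node, []):
--                 if neighbor not in visited:
--                     visited.add(neighbor)
--                     queue.append((neighbor, current_depth + 1))
--
--     return sorted(nodes_at_depth)
-- ===== SOURCE B (Python) =====
-- def bfs_at_depth(graph, start, depth):
--     """Level-synchronous BFS: expand the frontier depth times, return it sorted."""
--     if depth <= 0:
--         return []
--     visited = {start}
--     frontier = [start]
--     for _ in range(depth):
--         if not frontier:
--             break
--         next_frontier = []
--         for node in frontier:
--             for neighbor in graph.get(node, []):
--                 if neighbor not in visited:
--                     visited.add(neighbor)
--                     next_frontier.append(neighbor)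
--         frontier = next_frontier
--     return sorted(frontier)
-- ===== Notes on version B (the rewrite author's own statement) =====
-- stated objective: alternative
-- what changed: Replaces the single depth-tagged FIFO queue with a level-synchronous BFS: a loop that runs exactly depth times, rebuilding the whole frontier from each level's unvisited neighbors, so no per-node depth tags or queue are kept.
import Mathlib
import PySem

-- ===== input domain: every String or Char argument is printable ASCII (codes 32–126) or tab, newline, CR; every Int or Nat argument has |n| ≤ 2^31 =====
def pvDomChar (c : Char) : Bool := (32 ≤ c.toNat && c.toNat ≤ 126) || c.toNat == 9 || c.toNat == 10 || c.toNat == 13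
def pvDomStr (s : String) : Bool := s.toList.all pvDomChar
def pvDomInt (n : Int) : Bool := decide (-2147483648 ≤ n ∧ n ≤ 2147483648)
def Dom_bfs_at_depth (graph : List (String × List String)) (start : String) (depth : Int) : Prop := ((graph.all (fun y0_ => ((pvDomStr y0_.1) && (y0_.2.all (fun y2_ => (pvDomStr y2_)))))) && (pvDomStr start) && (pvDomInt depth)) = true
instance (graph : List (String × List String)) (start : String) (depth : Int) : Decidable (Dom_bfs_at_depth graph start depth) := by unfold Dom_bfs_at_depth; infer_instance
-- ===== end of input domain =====

-- B replaces A's depth-tagged FIFO queue by a level-synchronous BFS (expand the frontier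
-- exactly depth times); same return value, no speed claim.

-- ===== PORT A =====
-- helpers needed by port A's termination proof (cited in decreasing_by):

-- the inner "for neighbor in graph.get(node, [])" loop, in recursive form:
-- returns (updated visited, list of freshly discovered neighbors in order)
def nbCollect (v : PySem.Set String) : List String → PySem.Set String × List String
  | [] => (v, [])
  | nb :: t =>
    if PySem.Set.contains v nb then nbCollect v t
    else
      let r := nbCollect (PySem.Set.add v nb) t
      (r.1, nb :: r.2)

-- A's inner foldl (queue-appending form) expressed through nbCollect
theorem aFold_eq (cd : Int) (ns : List String) :
    ∀ (q : List (String × Int)) (v : PySem.Set String),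
    ns.foldl (fun (p : List (String × Int) × PySem.Set String) nb =>
        if PySem.Set.contains p.2 nb then p
        else (p.1 ++ [(nb, cd + 1)], PySem.Set.add p.2 nb)) (q, v)
      = (q ++ ((nbCollect v ns).2.map (fun s => (s, cd + 1))), (nbCollect v ns).1) := by
  induction ns with
  | nil => intro q v; simp [nbCollect]
  | cons nb t ih =>
    intro q v
    by_cases hm : nb ∈ v
    · have h : PySem.Set.contains v nb = true := (PySem.Set.contains_iff v nb).mpr hm
      have h1 : nbCollect v (nb :: t) = nbCollect v t := by simp [nbCollect, hm]
      simp only [List.foldl_cons]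
      rw [if_pos h, ih, h1]
    · have h : ¬ PySem.Set.contains v nb = true :=
        fun hc => hm ((PySem.Set.contains_iff v nb).mp hc)
      have h1 : nbCollect v (nb :: t)
          = ((nbCollect (PySem.Set.add v nb) t).1,
             nb :: (nbCollect (PySem.Set.add v nb) t).2) := by
        simp [nbCollect, hm]
      simp only [List.foldl_cons]
      rw [if_neg h, ih, h1]
      simp

def unvis (cands : List String) (v : PySem.Set String) : Nat :=
  (cands.toFinset \ v.toFinset).card

theorem unvis_add_lt (cands : List String) (v : PySem.Set String) (nb : String)
    (hm : nb ∈ cands) (hv : nb ∉ v) :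
    unvis cands (PySem.Set.add v nb) < unvis cands v := by
  apply Finset.card_lt_card
  constructor
  · intro x hx
    rw [Finset.mem_sdiff] at hx ⊢
    refine ⟨hx.1, fun hc => hx.2 ?_⟩
    rw [List.mem_toFinset] at hc ⊢
    exact (PySem.Set.mem_add _ _ _).mpr (Or.inl hc)
  · intro hsub
    have h1 : nb ∈ cands.toFinset \ v.toFinset := by
      rw [Finset.mem_sdiff, List.mem_toFinset, List.mem_toFinset]
      exact ⟨hm, hv⟩
    have h2 := hsub h1
    rw [Finset.mem_sdiff, List.mem_toFinset, List.mem_toFinset] at h2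
    exact h2.2 ((PySem.Set.mem_add _ _ _).mpr (Or.inr rfl))

theorem nbCollect_measure (cands : List String) (ns : List String) :
    ∀ (v : PySem.Set String), (∀ x ∈ ns, x ∈ cands) →
    (nbCollect v ns).2.length + 2 * unvis cands (nbCollect v ns).1 ≤ 2 * unvis cands v := by
  induction ns with
  | nil => intro v _; simp [nbCollect]
  | cons nb t ih =>
    intro v h
    by_cases hm : nb ∈ v
    · have h1 : nbCollect v (nb :: t) = nbCollect v t := by simp [nbCollect, hm]
      rw [h1]
      exact ih v (fun x hx => h x (List.mem_cons_of_mem _ hx))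
    · have h1 : nbCollect v (nb :: t)
          = ((nbCollect (PySem.Set.add v nb) t).1,
             nb :: (nbCollect (PySem.Set.add v nb) t).2) := by simp [nbCollect, hm]
      rw [h1]
      have h2 := ih (PySem.Set.add v nb) (fun x hx => h x (List.mem_cons_of_mem _ hx))
      have h3 := unvis_add_lt cands v nb (h nb List.mem_cons_self) hm
      simp only [List.length_cons]
      omega

theorem getD_mem_flat (graph : List (String × List String)) (node x : String)
    (hx : x ∈ PySem.Dict.getD (PySem.Dict.mk graph) node []) :
    x ∈ graph.flatMap Prod.snd := by
  rw [PySem.Dict.getD_eq_get?_getD] at hx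
  unfold PySem.Dict.get? at hx
  cases hf : List.find? (fun p => p.1 == node) (PySem.Dict.mk graph).items with
  | none => rw [hf] at hx; simp at hx
  | some p =>
    rw [hf] at hx
    simp only [Option.map_some, Option.getD_some] at hx
    have hp : p ∈ graph := List.mem_of_find?_eq_some hf
    exact List.mem_flatMap.mpr ⟨p, hp, hx⟩

-- the while-loop of A: queue of (node, depth) pairs, visited set, accumulator
def bfs_at_depth_loop (graph : List (String × List String)) (depth : Int)
    (queue : List (String × Int)) (visited : PySem.Set String) (acc : List String) :
    List String :=
  match queue with
  | [] => acc
  | (node, cd) :: rest =>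
    if cd = depth then
      bfs_at_depth_loop graph depth rest visited (acc ++ [node])
    else if cd < depth then
      let p := (PySem.Dict.getD (PySem.Dict.mk graph) node []).foldl
        (fun (p : List (String × Int) × PySem.Set String) nb =>
          if PySem.Set.contains p.2 nb then p
          else (p.1 ++ [(nb, cd + 1)], PySem.Set.add p.2 nb)) (rest, visited)
      bfs_at_depth_loop graph depth p.1 p.2 acc
    else
      bfs_at_depth_loop graph depth rest visited acc
termination_by queue.length + 2 * unvis (graph.flatMap Prod.snd) visited
decreasing_by
  · simp
  · simp only [dite_eq_ite]
    rw [aFold_eq]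
    simp only [List.length_append, List.length_map, List.length_cons]
    have := nbCollect_measure (graph.flatMap Prod.snd)
      (PySem.Dict.getD (PySem.Dict.mk graph) node []) visited
      (fun x hx => getD_mem_flat graph node x hx)
    omega
  · simp

def bfs_at_depth (graph : List (String × List String)) (start : String) (depth : Int) :
    List String :=
  if depth = 0 then []
  else
    let visited := PySem.Set.add PySem.Set.empty start
    let nodes := bfs_at_depth_loop graph depth [(start, 0)] visited []
    PySem.List.sorted nodes (fun x => x) false

-- ===== PORT B =====
-- one level of B: rebuild next_frontier from the current frontier
def bfs_alt_level (graph : List (String × List String))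
    (st : PySem.Set String × List String) : PySem.Set String × List String :=
  st.2.foldl (fun (p : PySem.Set String × List String) node =>
      (PySem.Dict.getD (PySem.Dict.mk graph) node []).foldl
        (fun (p : PySem.Set String × List String) nb =>
          if PySem.Set.contains p.1 nb then p
          else (PySem.Set.add p.1 nb, p.2 ++ [nb])) p)
    (st.1, [])

-- 'for _ in range(depth)' with 'if not frontier: break': iterate the level step
def bfs_alt_run (graph : List (String × List String)) :
    Nat → PySem.Set String × List String → PySem.Set String × List String
  | 0, st => st
  | n + 1, st => if st.2 = [] then st else bfs_alt_run graph n (bfs_alt_level graph st)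

def bfs_at_depth_alt (graph : List (String × List String)) (start : String) (depth : Int) :
    List String :=
  if depth ≤ 0 then []
  else
    PySem.List.sorted
      (bfs_alt_run graph depth.toNat (PySem.Set.add PySem.Set.empty start, [start])).2
      (fun x => x) false

-- ===== PRECONDITION & SPEC =====
def Spec_bfs_at_depth (graph : List (String × List String)) (start : String) (depth : Int) (out : List String) : Prop := out = bfs_at_depth_alt graph start depth
instance (graph : List (String × List String)) (start : String) (depth : Int) (out : List String) : Decidable (Spec_bfs_at_depth graph start depth out) := by unfold Spec_bfs_at_depth; infer_instance

-- ===== CLAIM (what is proved, stated in full; the proofs are below) =====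
def Claim_equal_bfs_at_depth : Prop := ∀ (graph : List (String × List String)) (start : String) (depth : Int), Dom_bfs_at_depth graph start depth → Spec_bfs_at_depth graph start depth (bfs_at_depth graph start depth)

-- ===== LEMMAS AND PROOFS =====

-- B's inner foldl expressed through nbCollect
theorem bFold_eq (ns : List String) :
    ∀ (v : PySem.Set String) (out : List String),
    ns.foldl (fun (p : PySem.Set String × List String) nb =>
        if PySem.Set.contains p.1 nb then p
        else (PySem.Set.add p.1 nb, p.2 ++ [nb])) (v, out)
      = ((nbCollect v ns).1, out ++ (nbCollect v ns).2) := by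
  induction ns with
  | nil => intro v out; simp [nbCollect]
  | cons nb t ih =>
    intro v out
    by_cases hm : nb ∈ v
    · have h : PySem.Set.contains v nb = true := (PySem.Set.contains_iff v nb).mpr hm
      have h1 : nbCollect v (nb :: t) = nbCollect v t := by simp [nbCollect, hm]
      simp only [List.foldl_cons]
      rw [if_pos h, ih, h1]
    · have h : ¬ PySem.Set.contains v nb = true :=
        fun hc => hm ((PySem.Set.contains_iff v nb).mp hc)
      have h1 : nbCollect v (nb :: t)
          = ((nbCollect (PySem.Set.add v nb) t).1,
             nb :: (nbCollect (PySem.Set.add v nb) t).2) := by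
        simp [nbCollect, hm]
      simp only [List.foldl_cons]
      rw [if_neg h, ih, h1]
      simp

-- the whole level step (both nested for-loops of B), in recursive form
def levelCollect (graph : List (String × List String)) :
    PySem.Set String → List String → PySem.Set String × List String
  | v, [] => (v, [])
  | v, node :: t =>
    let c := nbCollect v (PySem.Dict.getD (PySem.Dict.mk graph) node [])
    let r := levelCollect graph c.1 t
    (r.1, c.2 ++ r.2)

theorem bLevelFold_eq (graph : List (String × List String)) (P : List String) :
    ∀ (v : PySem.Set String) (out : List String),
    P.foldl (fun (p : PySem.Set String × List String) node =>
        (PySem.Dict.getD (PySem.Dict.mk graph) node []).foldl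
          (fun (p : PySem.Set String × List String) nb =>
            if PySem.Set.contains p.1 nb then p
            else (PySem.Set.add p.1 nb, p.2 ++ [nb])) p) (v, out)
      = ((levelCollect graph v P).1, out ++ (levelCollect graph v P).2) := by
  induction P with
  | nil => intro v out; simp [levelCollect]
  | cons node t ih =>
    intro v out
    simp only [List.foldl_cons]
    rw [bFold_eq, ih]
    simp [levelCollect]

theorem level_eq (graph : List (String × List String)) (v : PySem.Set String)
    (P : List String) :
    bfs_alt_level graph (v, P) = levelCollect graph v P := by
  unfold bfs_alt_level
  rw [bLevelFold_eq]
  simp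

-- A's loop on a queue entirely at the target depth just flushes it into acc
theorem loop_terminal (graph : List (String × List String)) (depth : Int)
    (P : List String) :
    ∀ (v : PySem.Set String) (acc : List String),
    bfs_at_depth_loop graph depth (P.map (fun s => (s, depth))) v acc = acc ++ P := by
  induction P with
  | nil => intro v acc; simp [bfs_at_depth_loop]
  | cons node t ih =>
    intro v acc
    rw [List.map_cons, bfs_at_depth_loop]
    rw [if_pos rfl, ih]
    simp

-- A's loop consumes one whole level exactly like B's level step
theorem loop_level (graph : List (String × List String)) (depth cd : Int)
    (h : cd < depth) (P : List String) :
    ∀ (Q : List String) (v : PySem.Set String) (acc : List String),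
    bfs_at_depth_loop graph depth
        (P.map (fun s => (s, cd)) ++ Q.map (fun s => (s, cd + 1))) v acc
      = bfs_at_depth_loop graph depth
          ((Q ++ (levelCollect graph v P).2).map (fun s => (s, cd + 1)))
          (levelCollect graph v P).1 acc := by
  induction P with
  | nil => intro Q v acc; simp [levelCollect]
  | cons node t ih =>
    intro Q v acc
    rw [List.map_cons, List.cons_append, bfs_at_depth_loop]
    rw [if_neg (by omega : ¬ cd = depth), if_pos h]
    simp only [aFold_eq]
    have harr : (t.map (fun s => (s, cd)) ++ Q.map (fun s => (s, cd + 1))) ++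
        ((nbCollect v (PySem.Dict.getD (PySem.Dict.mk graph) node [])).2.map
          (fun s => (s, cd + 1)))
        = t.map (fun s => (s, cd)) ++
          ((Q ++ (nbCollect v (PySem.Dict.getD (PySem.Dict.mk graph) node [])).2).map
            (fun s => (s, cd + 1))) := by
      simp [List.append_assoc]
    rw [harr, ih]
    simp [levelCollect, List.append_assoc]

-- iterating: a queue at level cd, n levels below depth, yields B's n-fold level iteration
theorem main_iter (graph : List (String × List String)) (depth : Int) (n : Nat) :
    ∀ (cd : Int), cd + (n : Int) = depth →
    ∀ (v : PySem.Set String) (P : List String),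
    bfs_at_depth_loop graph depth (P.map (fun s => (s, cd))) v []
      = (bfs_alt_run graph n (v, P)).2 := by
  induction n with
  | zero =>
    intro cd hcd v P
    have hc : cd = depth := by push_cast at hcd; omega
    subst hc
    rw [loop_terminal]
    simp [bfs_alt_run]
  | succ n ih =>
    intro cd hcd v P
    have hlt : cd < depth := by push_cast at hcd; omega
    have h0 : P.map (fun s => (s, cd))
        = P.map (fun s => (s, cd)) ++ ([] : List String).map (fun s => (s, cd + 1)) := by
      simp
    by_cases hP : P = []
    · subst hP
      simp only [List.map_nil]
      rw [bfs_at_depth_loop]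
      simp [bfs_alt_run]
    · rw [h0, loop_level graph depth cd hlt P [] v []]
      rw [List.nil_append]
      rw [ih (cd + 1) (by push_cast at hcd ⊢; omega)]
      have hrun : bfs_alt_run graph (n + 1) (v, P)
          = bfs_alt_run graph n (bfs_alt_level graph (v, P)) := by
        simp [bfs_alt_run, hP]
      rw [hrun, level_eq]

theorem bfs_agree (graph : List (String × List String)) (start : String) (depth : Int) :
    bfs_at_depth graph start depth = bfs_at_depth_alt graph start depth := by
  have hA : bfs_at_depth graph start depth
      = (if depth = 0 then [] else
          PySem.List.sorted
            (bfs_at_depth_loop graph depth [(start, 0)]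
              (PySem.Set.add PySem.Set.empty start) [])
            (fun x => x) false) := rfl
  have hB : bfs_at_depth_alt graph start depth
      = (if depth ≤ 0 then [] else
          PySem.List.sorted
            (bfs_alt_run graph depth.toNat (PySem.Set.add PySem.Set.empty start, [start])).2
            (fun x => x) false) := rfl
  rw [hA, hB]
  by_cases h0 : depth = 0
  · rw [if_pos h0, if_pos (by omega)]
  · rw [if_neg h0]
    by_cases hneg : depth ≤ 0
    · rw [if_pos hneg]
      rw [bfs_at_depth_loop]
      rw [if_neg (by omega : ¬ (0 : Int) = depth), if_neg (by omega : ¬ (0 : Int) < depth)]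
      rw [bfs_at_depth_loop]
      decide
    · rw [if_neg hneg]
      have h1 : [((start : String), (0 : Int))]
          = [start].map (fun s => (s, (0 : Int))) := rfl
      rw [h1, main_iter graph depth depth.toNat 0 (by omega)]

-- ===== VERDICT (by name: the statement is the Claim_ definition above) =====
theorem bfs_at_depth_spec : Claim_equal_bfs_at_depth := by
  intro graph start depth _
  unfold Spec_bfs_at_depth
  exact bfs_agree graph start depth
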